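-- pv_equiv track=rewrite | github.com/binunu/coding-test-training | example-book-2/07.hash/exam_05.py | solution
-- ===== SOURCE A (Python) =====
-- from collections import defaultdict
--
-- def solution(genres, plays):
--     answer = []
--     d=defaultdict(list)
--     # {장르: [재생횟수, 고유번호]...} 로 저장
--     i=0
--     for g,p in zip(genres, plays):
--         d[g].append([i,p])
--         i+=1
--     # 장르안에서 플레이순 정렬
--
--     arr=sorted(d.items(),key=lambda x:-sum(play for _,play in x[1]))
--     for g, s in arr:
--         s.sort(key=lambda x : (-x[1],x[0]))
--         for i in s[:2]:
--             answer.append(i[0])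
--     return answer
-- ===== SOURCE B (Python) =====
-- def solution(genres, plays):
--     totals = {}
--     best = {}  # genre -> its top songs so far (at most two (plays, index) pairs, best first)
--     for i, (g, p) in enumerate(zip(genres, plays)):
--         totals[g] = totals.get(g, 0) + p
--         b = best.get(g, [])
--         if not b:
--             best[g] = [(p, i)]
--         elif p > b[0][0]:
--             best[g] = [(p, i), b[0]]
--         elif len(b) == 1 or p > b[1][0]:
--             best[g] = [b[0], (p, i)]
--     order = sorted(totals, key=lambda g: -totals[g])
--     return [i for g in order for _, i in best.get(g, [])]
-- ===== Notes on version B (the rewrite author's own statement) =====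
-- stated objective: alternative
-- what changed: A buckets the songs per genre and sorts every bucket by (-plays, index); B never sorts songs at all: a single streaming pass keeps each genre's running top-2 by direct comparison (and accumulates the genre totals), and only the genres are sorted by total at the end.
import Mathlib
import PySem

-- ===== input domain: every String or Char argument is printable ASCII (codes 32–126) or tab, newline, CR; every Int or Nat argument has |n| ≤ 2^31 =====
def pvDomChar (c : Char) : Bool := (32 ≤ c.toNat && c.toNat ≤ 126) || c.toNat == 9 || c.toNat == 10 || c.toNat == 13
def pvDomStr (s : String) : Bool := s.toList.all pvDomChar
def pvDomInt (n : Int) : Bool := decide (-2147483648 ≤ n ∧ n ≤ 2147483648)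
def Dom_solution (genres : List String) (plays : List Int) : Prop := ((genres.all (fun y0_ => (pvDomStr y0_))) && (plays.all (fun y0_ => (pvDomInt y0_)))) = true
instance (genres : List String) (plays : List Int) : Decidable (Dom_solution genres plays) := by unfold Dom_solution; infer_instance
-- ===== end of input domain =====

-- B replaces A's per-genre bucket sorts by a single streaming pass that maintains each
-- genre's running top-2 songs by direct comparison (no sort of the songs at all);
-- only the genres are sorted (objective: alternative decomposition).


-- ===== PORT A =====
-- d[g].append([i,p]) on a defaultdict(list) is Dict.modify g [] (· ++ [(i,p)]);
-- the manual counter i travels as the second component of the fold state.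
def solution (genres : List String) (plays : List Int) : List Int :=
  let d := ((genres.zip plays).foldl
    (fun (s : PySem.Dict String (List (Int × Int)) × Int) gp =>
      (s.1.modify gp.1 [] (fun v => v ++ [(s.2, gp.2)]), s.2 + 1))
    (PySem.Dict.empty, 0)).1
  let arr := PySem.List.sorted d.items (fun x => -((x.2.map (fun q => q.2)).sum))
  arr.foldl (fun answer gs =>
    let s := PySem.List.sorted2 gs.2 (fun x => -x.2) (fun x => x.1)
    (PySem.List.slice s none (some 2)).foldl (fun ans i => ans ++ [i.1]) answer) []

-- ===== PORT B =====
-- the totals update of B's loop body: totals[g] = totals.get(g, 0) + p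
def pvUpdT (d : PySem.Dict String Int) (t : Int × (String × Int)) : PySem.Dict String Int :=
  d.insert t.2.1 (d.getD t.2.1 0 + t.2.2)

-- the best update of B's loop body: keep at most two (plays, index) pairs, best first
def pvUpdB (d : PySem.Dict String (List (Int × Int))) (t : Int × (String × Int)) :
    PySem.Dict String (List (Int × Int)) :=
  match d.getD t.2.1 [] with
  | [] => d.insert t.2.1 [(t.2.2, t.1)]
  | b0 :: rest =>
    if t.2.2 > b0.1 then d.insert t.2.1 [(t.2.2, t.1), b0]
    else
      match rest with
      | [] => d.insert t.2.1 [b0, (t.2.2, t.1)]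
      | b1 :: _ => if t.2.2 > b1.1 then d.insert t.2.1 [b0, (t.2.2, t.1)] else d

def solution_alt (genres : List String) (plays : List Int) : List Int :=
  let st := (PySem.List.enumerate (genres.zip plays)).foldl
    (fun (s : PySem.Dict String Int × PySem.Dict String (List (Int × Int))) t =>
      (pvUpdT s.1 t, pvUpdB s.2 t))
    (PySem.Dict.empty, PySem.Dict.empty)
  (PySem.List.sorted st.1.keys (fun g => -(st.1.getD g 0))).flatMap
    (fun g => (st.2.getD g []).map (·.2))

-- ===== PRECONDITION & SPEC =====
def Spec_solution (genres : List String) (plays : List Int) (out : List Int) : Prop := out = solution_alt genres plays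
instance (genres : List String) (plays : List Int) (out : List Int) : Decidable (Spec_solution genres plays out) := by unfold Spec_solution; infer_instance

-- ===== CLAIM (what is proved, stated in full; the proofs are below) =====
def Claim_equal_solution : Prop := ∀ (genres : List String) (plays : List Int), Dom_solution genres plays → Spec_solution genres plays (solution genres plays)

-- ===== LEMMAS AND PROOFS =====

-- the (index, play)-tagged song list that A's building loop effectively folds over
def pvTag : List (String × Int) → Int → List (String × (Int × Int))
  | [], _ => []
  | (g, p) :: t, i => (g, (i, p)) :: pvTag t (i + 1)

theorem pvTag_eq_enumerate (L : List (String × Int)) (i : Int) :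
    pvTag L i = (PySem.List.enumerate L i).map (fun t => (t.2.1, (t.1, t.2.2))) := by
  induction L generalizing i with
  | nil => simp [pvTag, PySem.List.enumerate]
  | cons h t ih => simp [pvTag, PySem.List.enumerate, ih]

theorem pvTag_map_fst (L : List (String × Int)) (i : Int) :
    (pvTag L i).map (·.1) = L.map (·.1) := by
  induction L generalizing i with
  | nil => rfl
  | cons h t ih => simp [pvTag, ih]

theorem pvTag_filter_play (L : List (String × Int)) (i : Int) (g : String) :
    (((pvTag L i).filter (fun p => p.1 == g)).map (·.2)).map (·.2)
      = (L.filter (fun p => p.1 == g)).map (·.2) := by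
  induction L generalizing i with
  | nil => rfl
  | cons h t ih =>
    by_cases hg : h.1 = g <;> simp [pvTag, hg, ih]

-- A's building loop with its travelling counter is the pure modify-fold over pvTag
theorem pvLoopA_eq (L : List (String × Int))
    (d : PySem.Dict String (List (Int × Int))) (i : Int) :
    (L.foldl (fun s gp => (s.1.modify gp.1 [] (fun v => v ++ [(s.2, gp.2)]), s.2 + 1)) (d, i)).1
      = (pvTag L i).foldl (fun d p => d.modify p.1 [] (fun v => v ++ [p.2])) d := by
  induction L generalizing d i with
  | nil => rfl
  | cons h t ih => simp [pvTag, ih]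

-- B's combined loop splits into the two independent folds
theorem pvPairFold (l : List (Int × (String × Int)))
    (d1 : PySem.Dict String Int) (d2 : PySem.Dict String (List (Int × Int))) :
    l.foldl (fun s t => (pvUpdT s.1 t, pvUpdB s.2 t)) (d1, d2)
      = (l.foldl pvUpdT d1, l.foldl pvUpdB d2) := by
  induction l generalizing d1 d2 with
  | nil => rfl
  | cons h t ih => simp [ih]

-- B's totals fold is A-style modify-fold over the raw song list
theorem pvFoldT_eq (L : List (String × Int)) (s : Int) (d : PySem.Dict String Int) :
    (PySem.List.enumerate L s).foldl pvUpdT d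
      = L.foldl (fun d gp => d.modify gp.1 0 (fun v => v + gp.2)) d := by
  induction L generalizing s d with
  | nil => rfl
  | cons h t ih =>
    rw [PySem.List.enumerate_cons, List.foldl_cons, List.foldl_cons, ih]
    rfl

-- the totals loop sums the plays of each genre
theorem pvTotals_getD (L : List (String × Int)) (d : PySem.Dict String Int) (g : String) :
    (L.foldl (fun d gp => d.modify gp.1 0 (fun v => v + gp.2)) d).getD g 0
      = d.getD g 0 + ((L.filter (fun p => p.1 == g)).map (·.2)).sum := by
  induction L generalizing d with
  | nil => simp
  | cons h t ih =>
    simp only [List.foldl_cons, ih, PySem.Dict.getD_modify, List.filter_cons]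
    by_cases hg : g = h.1
    · simp [hg]; omega
    · have h1 : ¬ h.1 = g := fun h' => hg h'.symm
      simp [hg, h1]

-- sorted2 is sorted with the lexicographic key
theorem pvSorted2_eq_sorted_lex {α : Type} (xs : List α) (k1 k2 : α → Int) :
    PySem.List.sorted2 xs k1 k2 = PySem.List.sorted xs (fun x => toLex (k1 x, k2 x)) := by
  rw [PySem.List.sorted_eq_foldl_insertBy]
  show List.foldl (fun acc x => PySem.List.insertBy
      (fun a b => decide (k1 a < k1 b) || (!decide (k1 b < k1 a) && decide (k2 a < k2 b))) x acc) [] xs = _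
  congr 1
  funext acc x
  congr 1
  funext a b
  have : (toLex (k1 a, k2 a) < toLex (k1 b, k2 b)) ↔
      (k1 a < k1 b ∨ (k1 a = k1 b ∧ k2 a < k2 b)) := Prod.Lex.lt_iff
  by_cases h1 : k1 a < k1 b
  · simp [h1, this]
  · by_cases h2 : k1 b < k1 a
    · simp [h1, h2, this]
      omega
    · by_cases h3 : k2 a < k2 b
      · have heq : k1 a = k1 b := le_antisymm (not_lt.1 h2) (not_lt.1 h1)
        have hlt : toLex (k1 a, k2 a) < toLex (k1 b, k2 b) := this.mpr (Or.inr ⟨heq, h3⟩)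
        simp [h1, h2, h3, hlt]
      · simp [h1, h2, h3, this]

-- insertBy commutes with map when the comparison factors through the map
theorem pvInsertBy_map {α β : Type} (f : α → β) (bf : β → β → Bool) (bx : α → α → Bool)
    (hc : ∀ a b, bf (f a) (f b) = bx a b) (x : α) (ys : List α) :
    PySem.List.insertBy bf (f x) (ys.map f) = (PySem.List.insertBy bx x ys).map f := by
  induction ys with
  | nil => rfl
  | cons y t ih =>
    simp only [List.map_cons, PySem.List.insertBy, hc]
    by_cases h : bx x y <;> simp [h, ih]

-- sorted commutes with map when the key factors through the map
theorem pvSorted_map {α β κ : Type} [LinearOrder κ] (f : α → β) (key : β → κ) (xs : List α) :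
    PySem.List.sorted (xs.map f) key = (PySem.List.sorted xs (fun x => key (f x))).map f := by
  rw [PySem.List.sorted_eq_foldl_insertBy, PySem.List.sorted_eq_foldl_insertBy]
  induction xs using List.reverseRecOn with
  | nil => rfl
  | append_singleton t x ih =>
    simp only [List.map_append, List.foldl_append, List.foldl_cons, List.foldl_nil, ih]
    exact pvInsertBy_map f _ _ (fun a b => rfl) x _

-- the insertion comparator of sorted2 with keys (-plays, index)
def pvCmpB (a b : Int × Int) : Bool :=
  decide (toLex ((-a.1 : Int), a.2) < toLex ((-b.1 : Int), b.2))

theorem pvSorted2B_snoc (ys : List (Int × Int)) (y : Int × Int) :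
    PySem.List.sorted2 (ys ++ [y]) (fun x => -x.1) (fun x => x.2)
      = PySem.List.insertBy pvCmpB y
          (PySem.List.sorted2 ys (fun x => -x.1) (fun x => x.2)) := by
  rw [pvSorted2_eq_sorted_lex, pvSorted2_eq_sorted_lex,
      PySem.List.sorted_eq_foldl_insertBy, PySem.List.sorted_eq_foldl_insertBy,
      List.foldl_append]
  rfl

-- when the new index beats every stored index, the lexicographic test is a plain plays test
theorem pvLexCmp (p i q j : Int) (h : j < i) :
    (toLex ((-p : Int), i) < toLex ((-q : Int), j)) ↔ q < p := by
  rw [Prod.Lex.lt_iff]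
  dsimp
  omega

-- take n only looks at the first n elements of the list being inserted into
theorem pvTake_cons_take {α : Type} (y : α) (t : List α) (m : Nat) :
    (y :: t.take m).take m = (y :: t).take m := by
  cases m with
  | zero => rfl
  | succ k =>
    simp only [List.take_succ_cons, List.take_take]
    rw [Nat.min_eq_left (Nat.le_succ k)]

theorem pvTake_insertBy {α : Type} (cmp : α → α → Bool) (x : α) (l : List α) (n : Nat) :
    (PySem.List.insertBy cmp x l).take n = (PySem.List.insertBy cmp x (l.take n)).take n := by
  induction l generalizing n with
  | nil => simp
  | cons y t ih =>
    cases n with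
    | zero => simp
    | succ m =>
      by_cases h : cmp x y
      · simp only [PySem.List.insertBy, h, if_true, List.take_succ_cons]
        rw [pvTake_cons_take]
      · simp only [PySem.List.insertBy, h, Bool.false_eq_true, if_false, List.take_succ_cons]
        rw [ih]

-- updating a foreign genre leaves a bucket unchanged
theorem pvUpdB_getD_ne (d : PySem.Dict String (List (Int × Int))) (t : Int × (String × Int))
    (g : String) (hg : t.2.1 ≠ g) : (pvUpdB d t).getD g [] = d.getD g [] := by
  unfold pvUpdB
  have hne : ∀ v, (d.insert t.2.1 v).getD g [] = d.getD g [] := fun v =>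
    PySem.Dict.getD_insert_of_ne _ _ _ (fun h => hg h.symm)
  cases d.getD t.2.1 [] with
  | nil => exact hne _
  | cons b0 rest =>
    by_cases h1 : t.2.2 > b0.1
    · simp [h1, hne]
    · cases rest with
      | nil => simp [h1, hne]
      | cons b1 r2 => by_cases h2 : t.2.2 > b1.1 <;> simp [h1, h2, hne]

-- THE CORE INVARIANT: B's streaming pass keeps, per genre, exactly the first two
-- elements of the (-plays, index)-sorted list of that genre's (plays, index) pairs
theorem pvBest_getD (L : List (String × Int)) (s : Int) (g : String) :
    ((PySem.List.enumerate L s).foldl pvUpdB PySem.Dict.empty).getD g []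
      = (PySem.List.sorted2
          (((PySem.List.enumerate L s).filter (fun t => t.2.1 == g)).map
            (fun t => (t.2.2, t.1)))
          (fun x => -x.1) (fun x => x.2)).take 2 := by
  induction L using List.reverseRecOn with
  | nil => rfl
  | append_singleton t x ih =>
    rw [PySem.List.enumerate_append, List.foldl_append, List.filter_append]
    have henum1 : PySem.List.enumerate [x] (s + (t.length : Int))
        = [((s + (t.length : Int)), x)] := rfl
    rw [henum1]
    simp only [List.foldl_cons, List.foldl_nil]
    by_cases hg : x.1 = g
    · -- the new song belongs to genre g
      have hfil : ([((s + (t.length : Int)), x)].filter (fun t => t.2.1 == g))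
          = [((s + (t.length : Int)), x)] := by simp [hg]
      rw [hfil]
      set E := PySem.List.enumerate t s with hE
      set P := ((E.filter (fun t => t.2.1 == g)).map (fun t => (t.2.2, t.1))) with hP
      set S := PySem.List.sorted2 P (fun x => -x.1) (fun x => x.2) with hS
      have hy : ((E.filter (fun t => t.2.1 == g)) ++
            [((s + (t.length : Int)), x)]).map (fun t => (t.2.2, t.1))
          = P ++ [(x.2, s + (t.length : Int))] := by simp [hP]
      rw [hy, pvSorted2B_snoc, ← hS, pvTake_insertBy]
      -- every index stored so far is below the new index
      have hidx : ∀ q ∈ S.take 2, q.2 < s + (t.length : Int) := by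
        intro q hq
        have hq1 : q ∈ S := List.mem_of_mem_take hq
        have hq2 : q ∈ P := ((PySem.List.sorted2_perm _ _ _ _).mem_iff).1 hq1
        rw [hP, List.mem_map] at hq2
        obtain ⟨t', ht', rfl⟩ := hq2
        have ht'' : t' ∈ E := List.mem_of_mem_filter ht'
        rw [hE, PySem.List.mem_enumerate_iff] at ht''
        obtain ⟨k, hk, rfl⟩ := ht''
        simp only
        omega
      set d := E.foldl pvUpdB PySem.Dict.empty with hd
      have ih' : d.getD g [] = S.take 2 := ih
      have hdg : d.getD ((s + (t.length : Int)), x).2.1 [] = S.take 2 := by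
        show d.getD x.1 [] = S.take 2
        rw [hg, ih']
      have hcmp : ∀ q ∈ S.take 2,
          pvCmpB (x.2, s + (t.length : Int)) q = decide (q.1 < x.2) := by
        intro q hq
        have h := pvLexCmp x.2 (s + (t.length : Int)) q.1 q.2 (hidx q hq)
        simp only [pvCmpB]
        exact decide_eq_decide.mpr h
      -- case analysis on the shape of the stored (≤ 2 element) bucket
      unfold pvUpdB
      rw [hdg]
      rcases hb : S.take 2 with _ | ⟨a, r⟩
      · simp [hg, PySem.List.insertBy, PySem.Dict.getD_insert_self]
      · rcases r with _ | ⟨c, r2⟩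
        · -- bucket [a]
          have ha : a ∈ S.take 2 := by rw [hb]; simp
          by_cases h1 : x.2 > a.1
          · have hca : pvCmpB (x.2, s + (t.length : Int)) a = true := by rw [hcmp a ha]; simp [h1]
            simp [h1, hca, hg, PySem.List.insertBy, PySem.Dict.getD_insert_self]
          · have hca : pvCmpB (x.2, s + (t.length : Int)) a = false := by rw [hcmp a ha]; simp; omega
            simp [h1, hca, hg, PySem.List.insertBy, PySem.Dict.getD_insert_self]
        · -- bucket [a, c] (take 2 of a list never exceeds two elements)
          have hr2 : r2 = [] := by
            have := congrArg List.length hb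
            simp [List.length_take] at this
            cases r2 with
            | nil => rfl
            | cons z zs => simp at this; omega
          subst hr2
          have ha : a ∈ S.take 2 := by rw [hb]; simp
          have hc : c ∈ S.take 2 := by rw [hb]; simp
          by_cases h1 : x.2 > a.1
          · have hca : pvCmpB (x.2, s + (t.length : Int)) a = true := by rw [hcmp a ha]; simp [h1]
            simp [h1, hca, hg, PySem.List.insertBy, PySem.Dict.getD_insert_self]
          · have hca : pvCmpB (x.2, s + (t.length : Int)) a = false := by rw [hcmp a ha]; simp; omega
            by_cases h2 : x.2 > c.1
            · have hcc : pvCmpB (x.2, s + (t.length : Int)) c = true := by rw [hcmp c hc]; simp [h2]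
              simp [h1, h2, hca, hcc, hg, PySem.List.insertBy,
                    PySem.Dict.getD_insert_self]
            · have hcc : pvCmpB (x.2, s + (t.length : Int)) c = false := by rw [hcmp c hc]; simp; omega
              simp [h1, h2, hca, hcc, ih', hb, PySem.List.insertBy]
    · -- foreign genre: bucket and filtered list both unchanged
      have hfil : ([((s + (t.length : Int)), x)].filter (fun t => t.2.1 == g)) = [] := by
        simp [hg]
      rw [hfil, List.append_nil, pvUpdB_getD_ne _ _ _ (by simpa using hg), ih]

-- B's per-genre result equals A's: swap the pair components under one sort
theorem pvGenre_eq (L : List (String × Int)) (g : String) :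
    ((PySem.List.sorted2
        (((PySem.List.enumerate L 0).filter (fun t => t.2.1 == g)).map
          (fun t => (t.2.2, t.1)))
        (fun x => -x.1) (fun x => x.2)).take 2).map (·.2)
    = ((PySem.List.sorted2 (((pvTag L 0).filter (fun p => p.1 == g)).map (·.2))
        (fun x => -x.2) (fun x => x.1)).take 2).map (·.1) := by
  have hP : ((PySem.List.enumerate L 0).filter (fun t => t.2.1 == g)).map
        (fun t => (t.2.2, t.1))
      = ((((pvTag L 0).filter (fun p => p.1 == g)).map (·.2)).map Prod.swap) := by
    rw [pvTag_eq_enumerate, List.filter_map, List.map_map, List.map_map]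
    rfl
  rw [hP, pvSorted2_eq_sorted_lex, pvSorted2_eq_sorted_lex, pvSorted_map,
      ← List.map_take, List.map_map]
  rfl

-- A's answer loop appends the first components of the first two sorted songs of each genre
theorem pvAfold (arr : List (String × List (Int × Int))) :
    arr.foldl (fun answer gs =>
        (PySem.List.slice (PySem.List.sorted2 gs.2 (fun x => -x.2) (fun x => x.1))
          none (some 2)).foldl (fun ans i => ans ++ [i.1]) answer) []
      = arr.flatMap (fun gs =>
        (PySem.List.slice (PySem.List.sorted2 gs.2 (fun x => -x.2) (fun x => x.1))
          none (some 2)).map (·.1)) := by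
  rw [show arr.foldl (fun answer gs =>
        (PySem.List.slice (PySem.List.sorted2 gs.2 (fun x => -x.2) (fun x => x.1))
          none (some 2)).foldl (fun ans i => ans ++ [i.1]) answer) []
      = arr.foldl (fun answer gs => answer ++ (PySem.List.slice
          (PySem.List.sorted2 gs.2 (fun x => -x.2) (fun x => x.1)) none (some 2)).map (·.1)) []
    from PySem.List.foldl_congr_mem _ _ _ _
      (fun acc gs _ => PySem.List.foldl_append_singleton_eq_map _ _ _),
    PySem.List.foldl_append_eq_flatMap]
  simp

theorem pvMain (genres : List String) (plays : List Int) :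
    solution genres plays = solution_alt genres plays := by
  simp only [solution, solution_alt]
  rw [pvLoopA_eq, pvPairFold]
  set L := genres.zip plays with hL
  set T := pvTag L 0 with hT
  set dA := T.foldl (fun d p => d.modify p.1 [] (fun v => v ++ [p.2])) PySem.Dict.empty with hdA
  set tot := (PySem.List.enumerate L).foldl pvUpdT PySem.Dict.empty with htot
  set bestd := (PySem.List.enumerate L).foldl pvUpdB PySem.Dict.empty with hbd
  have htot' : tot = L.foldl (fun d gp => d.modify gp.1 0 (fun v => v + gp.2))
      PySem.Dict.empty := pvFoldT_eq L 0 _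
  have nodupA : dA.keys.Nodup := by
    rw [hdA]
    exact PySem.Dict.nodup_keys_foldl_modify_key _ _ _ _ _ (by simp)
  have hbucket : ∀ g : String, dA.getD g [] = (T.filter (fun p => p.1 == g)).map (·.2) := by
    intro g
    rw [hdA, PySem.Dict.getD_foldl_modify_append]
    simp
  have hkeys : dA.keys = tot.keys := by
    rw [hdA, htot',
        PySem.Dict.keys_foldl_modify_key T (fun p : String × (Int × Int) => p.1) []
          (fun _ p => fun v => v ++ [p.2]) PySem.Dict.empty,
        PySem.Dict.keys_foldl_modify_key L (fun p : String × Int => p.1) 0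
          (fun _ p => fun v => v + p.2) PySem.Dict.empty,
        hT, pvTag_map_fst]
    rfl
  have htotg : ∀ g : String, tot.getD g 0 = ((L.filter (fun p => p.1 == g)).map (·.2)).sum := by
    intro g
    rw [htot', pvTotals_getD]
    simp
  have hkeyfun : (fun g : String => -(((dA.getD g []).map (fun q => q.2)).sum))
      = (fun x : String => -(tot.getD x 0)) := by
    funext g
    rw [hbucket g, hT, pvTag_filter_play, htotg g]
  rw [PySem.Dict.items_eq_map_keys dA nodupA [], pvSorted_map, pvAfold,
      List.flatMap_map, hkeyfun, hkeys]
  refine List.flatMap_congr fun g _ => ?_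
  rw [hbucket g, hbd, pvBest_getD L 0 g,
      PySem.List.slice_to _ (by norm_num : (0 : Int) ≤ 2)]
  rw [show ((2 : Int).toNat) = 2 from rfl]
  exact (pvGenre_eq L g).symm

-- ===== VERDICT (by name: the statement is the Claim_ definition above) =====
theorem solution_spec : Claim_equal_solution := by
  intro genres plays _
  exact pvMain genres plays
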